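-- pv_equiv track=rewrite | github.com/19king19/neo-ziion | scan_to_json.py | search_batch
-- ===== SOURCE A (Python) =====
-- def search_batch(raw_text, keywords):
--     matches = {kw: [] for kw in keywords}
--     notes = raw_text.split("NOTE_END")
--     for note_raw in notes:
--         note_raw = note_raw.strip()
--         if not note_raw.startswith("NOTE_START|"):
--             continue
--         parts = note_raw.split("|", 3)
--         if len(parts) < 4:
--             continue
--         _, name, date, body = parts[0], parts[1], parts[2], parts[3]
--         body_lower = body.lower()
--         name_lower = name.lower()
--         for kw in keywords:
--             kw_lower = kw.lower()
--             if kw_lower in body_lower or kw_lower in name_lower: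
--                 preview = body[:500].strip()
--                 matches[kw].append({
--                     "name": name,
--                     "date": date,
--                     "preview": preview
--                 })
--     return matches
-- ===== SOURCE B (Python) =====
-- def _grams(text, lens):
--     """All substrings of text whose length occurs in lens, as a hash set."""
--     g = set()
--     for L in lens:
--         for i in range(len(text) - L + 1):
--             g.add(text[i:i+L])
--     return g
--
--
-- def _entry(seg, lens):
--     """Parse one raw segment; return (substring_set, record) or None."""
--     note = seg.strip()
--     if not note.startswith("NOTE_START|"):
--         return None
--     parts = note.split("|", 3)
--     if len(parts) < 4:
--         return None
--     _, name, date, body = parts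
--     grams = _grams(body.lower(), lens) | _grams(name.lower(), lens)
--     return (grams, {"name": name, "date": date, "preview": body[:500].strip()})
--
--
-- def search_batch(raw_text, keywords):
--     # Index each note once by the hash set of its substrings of the relevant
--     # lengths; every keyword then matches a note by one O(1) set lookup,
--     # with no substring scan per (note, keyword) pair.
--     lens = list(dict.fromkeys(len(kw.lower()) for kw in keywords))
--     entries = []
--     for seg in raw_text.split("NOTE_END"):
--         e = _entry(seg, lens)
--         if e is not None:
--             entries.append(e)
--     return {kw: [rec for grams, rec in entries if kw.lower() in grams]
--             for kw in keywords}
-- ===== Notes on version B (the rewrite author's own statement) =====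
-- stated objective: alternative
-- what changed: B matches by a different data structure: per note it builds once a hash set of all lowercased substrings whose length is some keyword length, so every keyword matches a note by a single O(1) set lookup instead of A's substring scan per (note, keyword) pair; Pre_ excludes keyword lists with a duplicate keyword, on which A's per-note double append into the one dict slot is an accidental artefact of iterating the raw list over a single dict key.
import Mathlib
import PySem

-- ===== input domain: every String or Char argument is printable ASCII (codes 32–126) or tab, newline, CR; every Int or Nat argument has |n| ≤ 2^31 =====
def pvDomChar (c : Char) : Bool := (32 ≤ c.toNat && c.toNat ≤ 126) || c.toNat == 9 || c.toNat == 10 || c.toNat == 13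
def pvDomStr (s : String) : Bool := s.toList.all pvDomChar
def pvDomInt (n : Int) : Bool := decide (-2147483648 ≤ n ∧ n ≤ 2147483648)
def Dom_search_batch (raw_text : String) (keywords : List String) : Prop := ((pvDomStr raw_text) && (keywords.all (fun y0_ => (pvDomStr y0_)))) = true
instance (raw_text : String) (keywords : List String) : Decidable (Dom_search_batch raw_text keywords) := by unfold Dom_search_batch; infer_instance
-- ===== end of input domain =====

-- B replaces A's per-(note, keyword) substring scan by a hash-set index built once per note:
-- the set of all of the note's lowercased substrings whose length is a keyword length, so each
-- keyword matches a note by one set lookup (a different data structure, not a rewritten scan).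

-- ===== PORT A =====
def search_batch (raw_text : String) (keywords : List String) : List (String × List (List (String × String))) :=
  let matchesD : PySem.Dict String (List (List (String × String))) :=
    keywords.foldl (fun d kw => d.insert kw []) PySem.Dict.empty
  let notes := (PySem.Str.split? raw_text "NOTE_END").getD []
  (notes.foldl (fun d note_raw =>
    let note := PySem.Str.strip note_raw
    if PySem.Str.startswith note "NOTE_START|" then
      let parts := (PySem.Str.splitMax? note "|" 3).getD []
      if parts.length < 4 then d
      else
        let name := PySem.List.pyGetD parts 1 ""
        let date := PySem.List.pyGetD parts 2 ""
        let body := PySem.List.pyGetD parts 3 ""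
        let body_lower := PySem.Str.lower body
        let name_lower := PySem.Str.lower name
        keywords.foldl (fun d kw =>
          let kw_lower := PySem.Str.lower kw
          if PySem.Str.isIn kw_lower body_lower || PySem.Str.isIn kw_lower name_lower then
            let preview := PySem.Str.strip (PySem.Str.slice body none (some 500))
            d.modify kw [] (fun l => l ++ [[("name", name), ("date", date), ("preview", preview)]])
          else d) d
    else d) matchesD).items

-- ===== PORT B =====
-- _grams(text, lens): the hash set of all substrings of text with a length in lens
def pvGramsB (text : String) (lens : List Int) : PySem.Set String :=
  lens.foldl (fun g L =>
    (PySem.List.pyRange 0 (PySem.Str.len text - L + 1)).foldl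
      (fun g i => PySem.Set.add g (PySem.Str.slice text (some i) (some (i + L)))) g)
    PySem.Set.empty

-- _entry(seg, lens): parse one raw segment; none, or (substring set, record)
def pvEntryB (seg : String) (lens : List Int) :
    Option (PySem.Set String × List (String × String)) :=
  let note := PySem.Str.strip seg
  if PySem.Str.startswith note "NOTE_START|" then
    let parts := (PySem.Str.splitMax? note "|" 3).getD []
    if parts.length < 4 then none
    else
      let name := PySem.List.pyGetD parts 1 ""
      let date := PySem.List.pyGetD parts 2 ""
      let body := PySem.List.pyGetD parts 3 ""
      let grams := PySem.Set.union (pvGramsB (PySem.Str.lower body) lens)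
                                   (pvGramsB (PySem.Str.lower name) lens)
      some (grams, [("name", name), ("date", date),
        ("preview", PySem.Str.strip (PySem.Str.slice body none (some 500)))])
  else none

def search_batch_alt (raw_text : String) (keywords : List String) : List (String × List (List (String × String))) :=
  let lens := PySem.List.dedup (keywords.map (fun kw => PySem.Str.len (PySem.Str.lower kw)))
  let entries := ((PySem.Str.split? raw_text "NOTE_END").getD []).foldl
    (fun es seg => (pvEntryB seg lens).elim es (fun e => es ++ [e])) []
  keywords.map (fun kw =>
    (kw, (entries.filter (fun e => PySem.Set.contains e.1 (PySem.Str.lower kw))).map (fun e => e.2)))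

-- ===== PRECONDITION & SPEC =====
-- Pre_ excludes keyword lists with a duplicate keyword, on which A's per-note double append into
-- the single dict slot for that keyword is an accident of iterating the raw list over one dict key.
def Pre_search_batch (raw_text : String) (keywords : List String) : Prop := keywords.Nodup
instance (raw_text : String) (keywords : List String) : Decidable (Pre_search_batch raw_text keywords) := by unfold Pre_search_batch; infer_instance
def pvWitness_search_batch : String × List String := ("NOTE_START|a|1|hi NOTE_END", ["hi"])
def Spec_search_batch (raw_text : String) (keywords : List String) (out : List (String × List (List (String × String)))) : Prop := out = search_batch_alt raw_text keywords
instance (raw_text : String) (keywords : List String) (out : List (String × List (List (String × String)))) : Decidable (Spec_search_batch raw_text keywords out) := by unfold Spec_search_batch; infer_instance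

-- ===== CLAIM (what is proved, stated in full; the proofs are below) =====
def Claim_equal_search_batch : Prop := ∀ (raw_text : String) (keywords : List String), Dom_search_batch raw_text keywords → Pre_search_batch raw_text keywords → Spec_search_batch raw_text keywords (search_batch raw_text keywords)

-- ===== LEMMAS AND PROOFS =====
-- Proof-side view of one parsed note: (name.lower(), body.lower(), record), or none.
def pvParseNote (note_raw : String) : Option (String × String × List (String × String)) :=
  let note := PySem.Str.strip note_raw
  if PySem.Str.startswith note "NOTE_START|" then
    let parts := (PySem.Str.splitMax? note "|" 3).getD []
    if parts.length < 4 then none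
    else
      let name := PySem.List.pyGetD parts 1 ""
      let date := PySem.List.pyGetD parts 2 ""
      let body := PySem.List.pyGetD parts 3 ""
      some (PySem.Str.lower name, PySem.Str.lower body,
        [("name", name), ("date", date),
         ("preview", PySem.Str.strip (PySem.Str.slice body none (some 500)))])
  else none

-- A's note-step, named for the proofs.
def pvStepA (keywords : List String) (d : PySem.Dict String (List (List (String × String)))) (note_raw : String) : PySem.Dict String (List (List (String × String))) :=
  let note := PySem.Str.strip note_raw
  if PySem.Str.startswith note "NOTE_START|" then
    let parts := (PySem.Str.splitMax? note "|" 3).getD []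
    if parts.length < 4 then d
    else
      let name := PySem.List.pyGetD parts 1 ""
      let date := PySem.List.pyGetD parts 2 ""
      let body := PySem.List.pyGetD parts 3 ""
      let body_lower := PySem.Str.lower body
      let name_lower := PySem.Str.lower name
      keywords.foldl (fun d kw =>
        let kw_lower := PySem.Str.lower kw
        if PySem.Str.isIn kw_lower body_lower || PySem.Str.isIn kw_lower name_lower then
          let preview := PySem.Str.strip (PySem.Str.slice body none (some 500))
          d.modify kw [] (fun l => l ++ [[("name", name), ("date", date), ("preview", preview)]])
        else d) d
  else d

def pvHit (kw : String) (e : String × String × List (String × String)) : Bool :=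
  PySem.Str.isIn (PySem.Str.lower kw) e.2.1 || PySem.Str.isIn (PySem.Str.lower kw) e.1

theorem pvStepA_eq_parse (keywords : List String) (d : PySem.Dict String (List (List (String × String)))) (note_raw : String) :
    pvStepA keywords d note_raw =
      match pvParseNote note_raw with
      | none => d
      | some e => keywords.foldl (fun d kw =>
          if pvHit kw e then d.modify kw [] (fun l => l ++ [e.2.2]) else d) d := by
  unfold pvStepA pvParseNote pvHit
  dsimp only
  split_ifs <;> rfl

theorem pvInner_getD (e : String × String × List (String × String))
    (l : List String) (hnd : l.Nodup) (kw : String)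
    (d : PySem.Dict String (List (List (String × String)))) :
    (l.foldl (fun d k => if pvHit k e then d.modify k [] (fun l => l ++ [e.2.2]) else d) d).getD kw []
      = d.getD kw [] ++ (if kw ∈ l ∧ pvHit kw e = true then [e.2.2] else []) := by
  induction l generalizing d with
  | nil => simp
  | cons k0 t ih =>
    rcases List.nodup_cons.mp hnd with ⟨hk0, hndt⟩
    simp only [List.foldl_cons]
    rw [ih hndt]
    by_cases hkw : kw = k0
    · subst hkw
      have hkt : kw ∉ t := hk0
      by_cases hh : pvHit kw e = true
      · simp [hh, hkt]
      · simp [hh, hkt]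
    · by_cases hh : pvHit k0 e = true
      · simp [hh, PySem.Dict.getD_modify, hkw, List.mem_cons]
      · simp [hh, hkw, List.mem_cons]

theorem pvOuter_getD (keywords : List String) (hnd : keywords.Nodup) (kw : String) (hkw : kw ∈ keywords)
    (notes : List String) (d : PySem.Dict String (List (List (String × String)))) :
    (notes.foldl (pvStepA keywords) d).getD kw []
      = d.getD kw [] ++ ((notes.filterMap pvParseNote).filter (pvHit kw)).map (fun e => e.2.2) := by
  induction notes generalizing d with
  | nil => simp
  | cons n t ih =>
    simp only [List.foldl_cons]
    rw [pvStepA_eq_parse]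
    cases hp : pvParseNote n with
    | none =>
      dsimp only
      rw [ih, List.filterMap_cons_none hp]
    | some e =>
      dsimp only
      rw [ih, pvInner_getD e keywords hnd kw d, List.filterMap_cons_some hp, List.filter_cons]
      by_cases hh : pvHit kw e = true
      · simp [hh, hkw, List.append_assoc]
      · simp [hh, hkw]

theorem pvInner_keys (e : String × String × List (String × String))
    (l : List String)
    (d : PySem.Dict String (List (List (String × String)))) (h : ∀ k ∈ l, k ∈ d.keys) :
    (l.foldl (fun d k => if pvHit k e then d.modify k [] (fun l => l ++ [e.2.2]) else d) d).keys = d.keys := by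
  induction l generalizing d with
  | nil => simp
  | cons k0 t ih =>
    simp only [List.foldl_cons]
    by_cases hh : pvHit k0 e = true
    · have hk0 : k0 ∈ d.keys := h k0 (List.mem_cons_self ..)
      have hkeys : (d.modify k0 [] (fun l => l ++ [e.2.2])).keys = d.keys := by
        rw [PySem.Dict.keys_modify, PySem.Dict.keys_insert_of_contains]
        exact (PySem.Dict.contains_iff_mem_keys d k0).mpr hk0
      rw [hh]
      simp only [if_true]
      rw [ih _ (by intro k hk; rw [hkeys]; exact h k (List.mem_cons_of_mem _ hk)), hkeys]
    · simp only [hh]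
      simp only [Bool.false_eq_true, if_false]
      exact ih d (fun k hk => h k (List.mem_cons_of_mem _ hk))

theorem pvOuter_keys (keywords : List String) (notes : List String)
    (d : PySem.Dict String (List (List (String × String)))) (h : ∀ k ∈ keywords, k ∈ d.keys) :
    (notes.foldl (pvStepA keywords) d).keys = d.keys := by
  induction notes generalizing d with
  | nil => rfl
  | cons n t ih =>
    simp only [List.foldl_cons]
    rw [pvStepA_eq_parse]
    cases hp : pvParseNote n with
    | none => exact ih d h
    | some e =>
      dsimp only
      have hk := pvInner_keys e keywords d h
      rw [ih _ (by intro k hk'; rw [hk]; exact h k hk'), hk]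

theorem pvD0_keys (keywords : List String) (hnd : keywords.Nodup) :
    ((keywords.foldl (fun d kw => d.insert kw ([] : List (List (String × String)))) PySem.Dict.empty)).keys = keywords := by
  have h1 := PySem.Dict.keys_foldl_insert keywords (fun _ _ => ([] : List (List (String × String)))) PySem.Dict.empty
  simp only [PySem.Dict.keys_empty] at h1
  rw [h1, PySem.Set.update_nil_left]
  exact PySem.Set.ofList_eq_self_of_nodup keywords hnd

theorem pvD0_getD (l : List String) (d : PySem.Dict String (List (List (String × String))))
    (h : ∀ k, d.getD k [] = []) (kw : String) :
    (l.foldl (fun d kw => d.insert kw []) d).getD kw [] = [] := by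
  induction l generalizing d with
  | nil => exact h kw
  | cons k0 t ih =>
    simp only [List.foldl_cons]
    refine ih _ (fun k => ?_)
    rw [PySem.Dict.getD_insert]
    split_ifs with hk
    · rfl
    · exact h k

-- ===== B-side lemmas =====
theorem pvEntryB_eq_parse (seg : String) (lens : List Int) :
    pvEntryB seg lens = (pvParseNote seg).map (fun e =>
      (PySem.Set.union (pvGramsB e.2.1 lens) (pvGramsB e.1 lens), e.2.2)) := by
  unfold pvEntryB pvParseNote
  dsimp only
  split_ifs <;> rfl

theorem pvFoldl_filterMap {α β : Type} (f : α → Option β) (l : List α) (acc : List β) :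
    l.foldl (fun es x => (f x).elim es (fun e => es ++ [e])) acc
      = acc ++ l.filterMap f := by
  induction l generalizing acc with
  | nil => simp
  | cons h t ih =>
    cases hf : f h with
    | none => simp [hf, ih, List.filterMap_cons_none hf]
    | some e => simp [hf, ih, List.filterMap_cons_some hf]

theorem pvMem_foldl_add {α β : Type} [BEq β] [LawfulBEq β] (f : α → β) (l : List α)
    (g : PySem.Set β) (x : β) :
    (x ∈ l.foldl (fun g i => PySem.Set.add g (f i)) g) ↔ x ∈ g ∨ ∃ i ∈ l, f i = x := by
  induction l generalizing g with
  | nil => simp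
  | cons h t ih =>
    simp only [List.foldl_cons, ih, PySem.Set.mem_add, List.mem_cons]
    constructor
    · rintro (⟨hg | he⟩ | ⟨i, hi, he⟩)
      · exact Or.inl hg
      · exact Or.inr ⟨h, Or.inl rfl, he.symm⟩
      · exact Or.inr ⟨i, Or.inr hi, he⟩
    · rintro (hg | ⟨i, (rfl | hi), he⟩)
      · exact Or.inl (Or.inl hg)
      · exact Or.inl (Or.inr he.symm)
      · exact Or.inr ⟨i, hi, he⟩

theorem pvMem_grams_aux (text : String) (lens : List Int) (g : PySem.Set String) (x : String) :
    (x ∈ lens.foldl (fun g L =>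
        (PySem.List.pyRange 0 (PySem.Str.len text - L + 1)).foldl
          (fun g i => PySem.Set.add g (PySem.Str.slice text (some i) (some (i + L)))) g) g)
      ↔ x ∈ g ∨ ∃ L ∈ lens, ∃ i ∈ PySem.List.pyRange 0 (PySem.Str.len text - L + 1),
          PySem.Str.slice text (some i) (some (i + L)) = x := by
  induction lens generalizing g with
  | nil => simp
  | cons L t ih =>
    simp only [List.foldl_cons, ih,
      pvMem_foldl_add (fun i => PySem.Str.slice text (some i) (some (i + L)))]
    constructor
    · rintro (⟨hg | ⟨i, hi, he⟩⟩ | ⟨L', hL', hrest⟩)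
      · exact Or.inl hg
      · exact Or.inr ⟨L, List.mem_cons_self .., i, hi, he⟩
      · exact Or.inr ⟨L', List.mem_cons_of_mem _ hL', hrest⟩
    · rintro (hg | ⟨L', hL', i, hi, he⟩)
      · exact Or.inl (Or.inl hg)
      · rcases List.mem_cons.mp hL' with rfl | hL't
        · exact Or.inl (Or.inr ⟨i, hi, he⟩)
        · exact Or.inr ⟨L', hL't, i, hi, he⟩

theorem pvMem_grams (text : String) (lens : List Int) (x : String) :
    (x ∈ pvGramsB text lens) ↔ ∃ L ∈ lens, ∃ i : Int,
      (0 ≤ i ∧ i < PySem.Str.len text - L + 1) ∧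
      PySem.Str.slice text (some i) (some (i + L)) = x := by
  unfold pvGramsB
  rw [pvMem_grams_aux]
  simp only [PySem.List.mem_pyRange_one]
  constructor
  · rintro (h | ⟨L, hL, i, hi, he⟩)
    · exact absurd h (by simp [PySem.Set.empty])
    · exact ⟨L, hL, i, hi, he⟩
  · rintro ⟨L, hL, i, hi, he⟩
    exact Or.inr ⟨L, hL, i, hi, he⟩

-- membership in the per-keyword-length substring index ↔ Python's 'kwl in text'
theorem pvGrams_isIn (text kwl : String) (lens : List Int)
    (hnn : ∀ L ∈ lens, 0 ≤ L) (hmem : PySem.Str.len kwl ∈ lens) :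
    (kwl ∈ pvGramsB text lens) ↔ PySem.Str.isIn kwl text = true := by
  rw [pvMem_grams, PySem.Str.isIn_eq,
    ← PySem.Chars.exists_prefix_drop_iff_isIn kwl.toList text.toList]
  constructor
  · rintro ⟨L, hL, i, ⟨hi0, _⟩, he⟩
    have hL0 : 0 ≤ L := hnn L hL
    refine ⟨i.toNat, ?_⟩
    have hsl : (PySem.Str.slice text (some i) (some (i + L))).toList
        = List.take ((i + L).toNat - i.toNat) (List.drop i.toNat text.toList) := by
      rw [PySem.Str.toList_slice, PySem.Chars.slice_eq_listSlice,
        PySem.List.slice_toNat _ hi0 (by omega)]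
    rw [← he, hsl]
    exact List.take_prefix _ _
  · rintro ⟨j, hpre⟩
    have hK : PySem.Str.len kwl = (kwl.toList.length : Int) := rfl
    set n := text.toList.length with hndef
    set K := kwl.toList.length with hKdef
    have hpre' : kwl.toList <+: text.toList.drop (min j n) := by
      by_cases hj : j ≤ n
      · rwa [min_eq_left hj]
      · have hdrop : text.toList.drop j = [] := List.drop_eq_nil_of_le (by omega)
        have hnil : kwl.toList = [] := List.prefix_nil.mp (hdrop ▸ hpre)
        simp [hnil]
    have hlen : K ≤ n - min j n := by
      have h1 := hpre'.length_le
      simpa [List.length_drop] using h1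
    have hjn : min j n + K ≤ n := by omega
    refine ⟨PySem.Str.len kwl, hmem, ((min j n : Nat) : Int), ⟨by positivity, ?_⟩, ?_⟩
    · have hn : PySem.Str.len text = (n : Int) := rfl
      rw [hn, hK]
      push_cast
      omega
    · apply String.toList_inj.mp
      rw [hK, PySem.Str.toList_slice, PySem.Chars.slice_eq_listSlice,
        PySem.List.slice_natCast_add text.toList (min j n) K]
      exact (List.prefix_iff_eq_take.mp hpre').symm

-- ===== VERDICT (by name: the statement is the Claim_ definition above) =====
theorem search_batch_spec : Claim_equal_search_batch := by
  intro raw_text keywords _ hnd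
  unfold Spec_search_batch
  show ((((PySem.Str.split? raw_text "NOTE_END").getD []).foldl (pvStepA keywords)
      (keywords.foldl (fun d kw => d.insert kw []) PySem.Dict.empty))).items
    = search_batch_alt raw_text keywords
  set notes := (PySem.Str.split? raw_text "NOTE_END").getD [] with hnotes
  set d0 := keywords.foldl (fun d kw => d.insert kw ([] : List (List (String × String)))) PySem.Dict.empty with hd0
  have hkeys0 : d0.keys = keywords := pvD0_keys keywords hnd
  have hkeysF : (notes.foldl (pvStepA keywords) d0).keys = keywords := by
    rw [pvOuter_keys keywords notes d0 (by intro k hk; rw [hkeys0]; exact hk), hkeys0]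
  have hndF : (notes.foldl (pvStepA keywords) d0).keys.Nodup := by rw [hkeysF]; exact hnd
  rw [PySem.Dict.items_eq_map_keys _ hndF [], hkeysF]
  unfold search_batch_alt
  dsimp only
  set lens := PySem.List.dedup (keywords.map (fun kw => PySem.Str.len (PySem.Str.lower kw))) with hlens
  have hnn : ∀ L ∈ lens, 0 ≤ L := by
    intro L hL
    rcases List.mem_map.mp ((PySem.List.mem_dedup _ _).mp hL) with ⟨k, _, rfl⟩
    exact Int.natCast_nonneg _
  rw [← hnotes, pvFoldl_filterMap (fun seg => pvEntryB seg lens) notes []]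
  simp only [List.nil_append]
  have hent : notes.filterMap (fun seg => pvEntryB seg lens)
      = (notes.filterMap pvParseNote).map (fun e =>
          (PySem.Set.union (pvGramsB e.2.1 lens) (pvGramsB e.1 lens), e.2.2)) := by
    rw [List.map_filterMap]
    exact List.filterMap_congr (fun seg _ => pvEntryB_eq_parse seg lens)
  rw [hent]
  apply List.map_congr_left
  intro kw hkw
  rw [pvOuter_getD keywords hnd kw hkw notes d0, pvD0_getD keywords PySem.Dict.empty (fun k => by simp) kw]
  simp only [List.nil_append]
  have hmem : PySem.Str.len (PySem.Str.lower kw) ∈ lens :=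
    (PySem.List.mem_dedup _ _).mpr (List.mem_map_of_mem hkw)
  rw [List.filter_map, List.map_map]
  refine congrArg _ ?_
  refine congrArg _ ?_
  apply List.filter_congr
  intro e _
  apply Bool.coe_iff_coe.mp
  rw [Function.comp_apply, PySem.Set.contains_iff, PySem.Set.mem_union,
    pvGrams_isIn _ _ _ hnn hmem, pvGrams_isIn _ _ _ hnn hmem]
  simp [pvHit]
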